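-- pv_equiv track=rewrite | github.com/ruiseixasm/JsonMidiCreator | src/operand_generic.py | modulate_key
-- ===== SOURCE A (Python) =====
-- def modulate_key(tonic_offset: int = 0, degrees_0: int = 4, scale: list[int] = [1, 0, 1, 0, 1, 1, 0, 1, 0, 1, 0, 1]) -> int:
--     # The given scale shall always have a size of 12
--     tonic_modulation: int = 0
--     if len(scale) == 12 and sum(scale) > 0:
--         while degrees_0 > 0:
--             tonic_modulation += 1
--             degrees_0 -= scale[ (tonic_offset + tonic_modulation) % 12 ]
--         while degrees_0 < 0:
--             tonic_modulation -= 1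
--             degrees_0 += scale[ (tonic_offset + tonic_modulation) % 12 ]
--     return tonic_modulation
-- ===== SOURCE B (Python) =====
-- def modulate_key(tonic_offset: int = 0, degrees_0: int = 4, scale: list[int] = [1, 0, 1, 0, 1, 1, 0, 1, 0, 1, 0, 1]) -> int:
--     # Octave-jumping re-implementation: instead of consuming the degree count one
--     # scale step at a time, jump whole 12-step cycles at once (each cycle consumes
--     # sum(scale) degrees) and finish with at most 12 real steps in each direction.
--     if len(scale) != 12 or sum(scale) <= 0:
--         return 0
--     s = sum(scale)
--     o = tonic_offset
--     d = degrees_0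
--     tm = 0
--     if d > 0:
--         acc = scale[(o + tm + 1) % 12]
--         m = acc
--         for k in range(2, 13):
--             acc += scale[(o + tm + k) % 12]
--             if acc > m:
--                 m = acc
--         if d > m:
--             q = -((m - d) // s)          # ceil((d - m) / s) whole cycles
--             tm += 12 * q
--             d -= q * s
--         for _ in range(12):
--             if d <= 0:
--                 break
--             tm += 1
--             d -= scale[(o + tm) % 12]
--     if d < 0:
--         acc = scale[(o + tm - 1) % 12]
--         m = acc
--         for k in range(2, 13):
--             acc += scale[(o + tm - k) % 12]
--             if acc > m:
--                 m = acc
--         if d + m < 0: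
--             q = -((d + m) // s)          # ceil((-d - m) / s) whole cycles
--             tm -= 12 * q
--             d += q * s
--         for _ in range(12):
--             if d >= 0:
--                 break
--             tm -= 1
--             d += scale[(o + tm) % 12]
--     return tm
-- ===== Notes on version B (the rewrite author's own statement) =====
-- stated objective: alternative
-- what changed: Instead of walking the scale one semitone per loop iteration until the degree count is consumed, B jumps whole 12-semitone octaves at once (ceil-division of the remaining degrees by sum(scale)) and resolves the remainder with at most 12 real steps in each direction.
import Mathlib
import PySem

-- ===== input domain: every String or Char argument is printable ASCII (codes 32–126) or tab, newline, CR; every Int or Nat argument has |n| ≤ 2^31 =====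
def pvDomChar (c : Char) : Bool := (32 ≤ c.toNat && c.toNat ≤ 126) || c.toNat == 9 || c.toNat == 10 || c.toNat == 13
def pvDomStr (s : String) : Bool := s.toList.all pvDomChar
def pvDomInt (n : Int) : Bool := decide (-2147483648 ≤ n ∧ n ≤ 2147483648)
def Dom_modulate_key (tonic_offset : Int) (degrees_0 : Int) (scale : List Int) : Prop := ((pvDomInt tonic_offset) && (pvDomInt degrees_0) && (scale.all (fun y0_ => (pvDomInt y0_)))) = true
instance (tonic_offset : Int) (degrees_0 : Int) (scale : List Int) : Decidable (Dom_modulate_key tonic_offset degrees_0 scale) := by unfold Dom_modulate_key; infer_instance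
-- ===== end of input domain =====

-- B replaces A's one-semitone-at-a-time walk by jumping whole 12-step octaves
-- (each consuming sum(scale) degrees) and finishing with at most 12 real steps
-- per direction; both return the same tonic modulation on every input.
-- ===== PORT A =====
-- scale[(o+t) % 12]; the guard len(scale)=12 keeps the index in range, so the
-- IndexError case of pyGet? is unreachable and .getD 0 only totalizes.
def scA (o : Int) (sc : List Int) (t : Int) : Int :=
  (PySem.List.pyGet? sc (PySem.Int.mod (o + t) 12)).getD 0

-- `while degrees_0 > 0: tonic_modulation += 1; degrees_0 -= scale[...]`,
-- fuel only totalizes the loop (proved sufficient below).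
def upA (o : Int) (sc : List Int) : Nat → Int → Int → Int × Int
  | 0, d, tm => (d, tm)
  | f+1, d, tm => if 0 < d then upA o sc f (d - scA o sc (tm + 1)) (tm + 1) else (d, tm)

def downA (o : Int) (sc : List Int) : Nat → Int → Int → Int × Int
  | 0, d, tm => (d, tm)
  | f+1, d, tm => if d < 0 then downA o sc f (d + scA o sc (tm - 1)) (tm - 1) else (d, tm)

def modulate_key (tonic_offset : Int) (degrees_0 : Int) (scale : List Int) : Int :=
  if scale.length = 12 ∧ 0 < scale.sum then
    let p := upA tonic_offset scale (12 * degrees_0.toNat + 12) degrees_0 0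
    let q := downA tonic_offset scale (12 * p.1.natAbs + 12) p.1 p.2
    q.2
  else 0

-- ===== PORT B =====
def scB (o : Int) (sc : List Int) (t : Int) : Int :=
  (PySem.List.pyGet? sc (PySem.Int.mod (o + t) 12)).getD 0

-- max of the 12 cycle prefix sums upward from tm (Source B's first inner for-loop)
def upM (o : Int) (sc : List Int) (tm : Int) : Int :=
  ((PySem.List.pyRange 2 13 1).foldl
    (fun p k => let acc := p.1 + scB o sc (tm + k); (acc, if p.2 < acc then acc else p.2))
    (scB o sc (tm + 1), scB o sc (tm + 1))).2

-- max of the 12 cycle prefix sums downward from tm (Source B's second inner for-loop)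
def downM (o : Int) (sc : List Int) (tm : Int) : Int :=
  ((PySem.List.pyRange 2 13 1).foldl
    (fun p k => let acc := p.1 + scB o sc (tm - k); (acc, if p.2 < acc then acc else p.2))
    (scB o sc (tm - 1), scB o sc (tm - 1))).2

-- `for _ in range(12): if d <= 0: break; ...`
def upB (o : Int) (sc : List Int) : Nat → Int → Int → Int × Int
  | 0, d, tm => (d, tm)
  | f+1, d, tm => if d ≤ 0 then (d, tm) else upB o sc f (d - scB o sc (tm + 1)) (tm + 1)

def downB (o : Int) (sc : List Int) : Nat → Int → Int → Int × Int
  | 0, d, tm => (d, tm)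
  | f+1, d, tm => if 0 ≤ d then (d, tm) else downB o sc f (d + scB o sc (tm - 1)) (tm - 1)

def modulate_key_alt (tonic_offset : Int) (degrees_0 : Int) (scale : List Int) : Int :=
  if scale.length ≠ 12 ∨ scale.sum ≤ 0 then 0
  else
    let s := scale.sum
    let p1 : Int × Int :=
      if 0 < degrees_0 then
        let m := upM tonic_offset scale 0
        let p0 : Int × Int :=
          if m < degrees_0 then
            let q := -(PySem.Int.floordiv (m - degrees_0) s)
            (degrees_0 - q * s, 12 * q)
          else (degrees_0, 0)
        upB tonic_offset scale 12 p0.1 p0.2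
      else (degrees_0, 0)
    if p1.1 < 0 then
      let m := downM tonic_offset scale p1.2
      let p2 : Int × Int :=
        if p1.1 + m < 0 then
          let q := -(PySem.Int.floordiv (p1.1 + m) s)
          (p1.1 + q * s, p1.2 - 12 * q)
        else (p1.1, p1.2)
      (downB tonic_offset scale 12 p2.1 p2.2).2
    else p1.2



-- ===== PRECONDITION & SPEC =====
def Spec_modulate_key (tonic_offset : Int) (degrees_0 : Int) (scale : List Int) (out : Int) : Prop := out = modulate_key_alt tonic_offset degrees_0 scale
instance (tonic_offset : Int) (degrees_0 : Int) (scale : List Int) (out : Int) : Decidable (Spec_modulate_key tonic_offset degrees_0 scale out) := by unfold Spec_modulate_key; infer_instance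

-- ===== CLAIM (what is proved, stated in full; the proofs are below) =====
def Claim_equal_modulate_key : Prop := ∀ (tonic_offset : Int) (degrees_0 : Int) (scale : List Int), Dom_modulate_key tonic_offset degrees_0 scale → Spec_modulate_key tonic_offset degrees_0 scale (modulate_key tonic_offset degrees_0 scale)

-- ===== LEMMAS AND PROOFS =====

-- prefix sums of scale steps upward / downward from tm
def prefU (o : Int) (sc : List Int) (tm : Int) : Nat → Int
  | 0 => 0
  | k+1 => prefU o sc tm k + scA o sc (tm + (k+1 : Nat))

def prefD (o : Int) (sc : List Int) (tm : Int) : Nat → Int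
  | 0 => 0
  | k+1 => prefD o sc tm k + scA o sc (tm - (k+1 : Nat))

theorem scB_eq_scA (o : Int) (sc : List Int) (t : Int) : scB o sc t = scA o sc t := rfl

theorem upB_eq_upA (o : Int) (sc : List Int) : ∀ (f : Nat) (d tm : Int),
    upB o sc f d tm = upA o sc f d tm := by
  intro f
  induction f with
  | zero => intro d tm; rfl
  | succ n ih =>
    intro d tm
    by_cases h : d ≤ 0
    · simp [upB, upA, h, not_lt.2 h]
    · simp [upB, upA, h, not_le.1 h, ih, scB_eq_scA]

theorem downB_eq_downA (o : Int) (sc : List Int) : ∀ (f : Nat) (d tm : Int),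
    downB o sc f d tm = downA o sc f d tm := by
  intro f
  induction f with
  | zero => intro d tm; rfl
  | succ n ih =>
    intro d tm
    by_cases h : 0 ≤ d
    · simp [downB, downA, h, not_lt.2 h]
    · simp [downB, downA, h, not_le.1 h, ih, scB_eq_scA]

theorem scA_period (o : Int) (sc : List Int) (t : Int) : scA o sc (t + 12) = scA o sc t := by
  unfold scA
  have h : PySem.Int.mod (o + (t + 12)) 12 = PySem.Int.mod (o + t) 12 := by
    rw [PySem.Int.mod_eq_emod_of_pos (by norm_num), PySem.Int.mod_eq_emod_of_pos (by norm_num)]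
    omega
  rw [h]

theorem scA_period' (o : Int) (sc : List Int) (t : Int) : scA o sc (t - 12) = scA o sc t := by
  have := scA_period o sc (t - 12); rw [show t - 12 + 12 = t by ring] at this; omega

theorem up_exit (o : Int) (sc : List Int) (f : Nat) (d tm : Int) (h : d ≤ 0) :
    upA o sc f d tm = (d, tm) := by
  cases f with
  | zero => rfl
  | succ n => simp [upA, not_lt.2 h]

theorem down_exit (o : Int) (sc : List Int) (f : Nat) (d tm : Int) (h : 0 ≤ d) :
    downA o sc f d tm = (d, tm) := by
  cases f with
  | zero => rfl
  | succ n => simp [downA, not_lt.2 h]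

theorem up_absorb (o : Int) (sc : List Int) : ∀ (f e : Nat) (d tm : Int),
    (upA o sc f d tm).1 ≤ 0 → upA o sc (f + e) d tm = upA o sc f d tm := by
  intro f
  induction f with
  | zero =>
    intro e d tm h
    simp [upA] at h
    rw [Nat.zero_add, up_exit o sc e d tm h]; rfl
  | succ n ih =>
    intro e d tm h
    by_cases hd : 0 < d
    · rw [show n + 1 + e = (n + e) + 1 from by omega]
      simp only [upA, if_pos hd] at h ⊢
      exact ih e _ _ h
    · rw [up_exit o sc _ d tm (by omega), up_exit o sc _ d tm (by omega)]

theorem down_absorb (o : Int) (sc : List Int) : ∀ (f e : Nat) (d tm : Int),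
    0 ≤ (downA o sc f d tm).1 → downA o sc (f + e) d tm = downA o sc f d tm := by
  intro f
  induction f with
  | zero =>
    intro e d tm h
    simp [downA] at h
    rw [Nat.zero_add, down_exit o sc e d tm h]; rfl
  | succ n ih =>
    intro e d tm h
    by_cases hd : d < 0
    · rw [show n + 1 + e = (n + e) + 1 from by omega]
      simp only [downA, if_pos hd] at h ⊢
      exact ih e _ _ h
    · rw [down_exit o sc _ d tm (by omega), down_exit o sc _ d tm (by omega)]

theorem up_unique (o : Int) (sc : List Int) (f1 f2 : Nat) (d tm : Int)
    (h1 : (upA o sc f1 d tm).1 ≤ 0) (h2 : (upA o sc f2 d tm).1 ≤ 0) :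
    upA o sc f1 d tm = upA o sc f2 d tm := by
  rcases le_total f1 f2 with h | h
  · obtain ⟨e, rfl⟩ := Nat.exists_eq_add_of_le h
    rw [up_absorb o sc f1 e d tm h1]
  · obtain ⟨e, rfl⟩ := Nat.exists_eq_add_of_le h
    rw [up_absorb o sc f2 e d tm h2]

theorem down_unique (o : Int) (sc : List Int) (f1 f2 : Nat) (d tm : Int)
    (h1 : 0 ≤ (downA o sc f1 d tm).1) (h2 : 0 ≤ (downA o sc f2 d tm).1) :
    downA o sc f1 d tm = downA o sc f2 d tm := by
  rcases le_total f1 f2 with h | h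
  · obtain ⟨e, rfl⟩ := Nat.exists_eq_add_of_le h
    rw [down_absorb o sc f1 e d tm h1]
  · obtain ⟨e, rfl⟩ := Nat.exists_eq_add_of_le h
    rw [down_absorb o sc f2 e d tm h2]

theorem prefU_front (o : Int) (sc : List Int) : ∀ (k : Nat) (tm : Int),
    prefU o sc tm (k+1) = scA o sc (tm + 1) + prefU o sc (tm + 1) k := by
  intro k
  induction k with
  | zero => intro tm; simp [prefU]
  | succ n ih =>
    intro tm
    have h1 : prefU o sc tm (n+2) = prefU o sc tm (n+1) + scA o sc (tm + (n+2 : Nat)) := rfl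
    have h2 : prefU o sc (tm+1) (n+1) = prefU o sc (tm+1) n + scA o sc (tm + 1 + (n+1 : Nat)) := rfl
    rw [h1, h2, ih tm, show tm + ((n+2 : Nat) : Int) = tm + 1 + ((n+1 : Nat) : Int) by push_cast; ring]
    ring

theorem prefD_front (o : Int) (sc : List Int) : ∀ (k : Nat) (tm : Int),
    prefD o sc tm (k+1) = scA o sc (tm - 1) + prefD o sc (tm - 1) k := by
  intro k
  induction k with
  | zero => intro tm; simp [prefD]
  | succ n ih =>
    intro tm
    have h1 : prefD o sc tm (n+2) = prefD o sc tm (n+1) + scA o sc (tm - (n+2 : Nat)) := rfl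
    have h2 : prefD o sc (tm-1) (n+1) = prefD o sc (tm-1) n + scA o sc (tm - 1 - (n+1 : Nat)) := rfl
    rw [h1, h2, ih tm, show tm - ((n+2 : Nat) : Int) = tm - 1 - ((n+1 : Nat) : Int) by push_cast; ring]
    ring

theorem up_completes (o : Int) (sc : List Int) : ∀ (k : Nat) (f : Nat) (d tm : Int),
    d ≤ prefU o sc tm k → (upA o sc (k + f) d tm).1 ≤ 0 := by
  intro k
  induction k with
  | zero =>
    intro f d tm h
    simp [prefU] at h
    rw [up_exit o sc _ _ _ h]; exact h
  | succ n ih =>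
    intro f d tm h
    by_cases hd : d ≤ 0
    · rw [up_exit o sc _ _ _ hd]; exact hd
    · rw [show n + 1 + f = (n + f) + 1 from by omega]
      simp only [upA, if_pos (by omega : (0:Int) < d)]
      apply ih
      rw [prefU_front] at h
      omega

theorem down_completes (o : Int) (sc : List Int) : ∀ (k : Nat) (f : Nat) (d tm : Int),
    0 ≤ d + prefD o sc tm k → 0 ≤ (downA o sc (k + f) d tm).1 := by
  intro k
  induction k with
  | zero =>
    intro f d tm h
    simp [prefD] at h
    rw [down_exit o sc _ _ _ h]; exact h
  | succ n ih =>
    intro f d tm h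
    by_cases hd : 0 ≤ d
    · rw [down_exit o sc _ _ _ hd]; exact hd
    · rw [show n + 1 + f = (n + f) + 1 from by omega]
      simp only [downA, if_pos (by omega : d < 0)]
      apply ih
      rw [prefD_front] at h
      omega

theorem up_cases (o : Int) (sc : List Int) : ∀ (k : Nat) (f : Nat) (d tm : Int),
    (∃ j, j ≤ k ∧ d ≤ prefU o sc tm j) ∨
    ((∀ j, j ≤ k → prefU o sc tm j < d) ∧
      upA o sc (k + f) d tm = upA o sc f (d - prefU o sc tm k) (tm + (k : Int))) := by
  intro k
  induction k with
  | zero =>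
    intro f d tm
    by_cases hd : d ≤ 0
    · exact Or.inl ⟨0, le_refl 0, by simpa [prefU] using hd⟩
    · refine Or.inr ⟨?_, by simp [prefU]⟩
      intro j hj
      interval_cases j
      simp [prefU]; omega
  | succ n ih =>
    intro f d tm
    by_cases hd : d ≤ 0
    · exact Or.inl ⟨0, by omega, by simpa [prefU] using hd⟩
    · have hstep : upA o sc (n + 1 + f) d tm
          = upA o sc (n + f) (d - scA o sc (tm + 1)) (tm + 1) := by
        rw [show n + 1 + f = (n + f) + 1 from by omega]
        simp only [upA, if_pos (by omega : (0:Int) < d)]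
      rcases ih f (d - scA o sc (tm + 1)) (tm + 1) with ⟨j, hj, hle⟩ | ⟨hall, heq⟩
      · refine Or.inl ⟨j + 1, by omega, ?_⟩
        rw [prefU_front]
        omega
      · refine Or.inr ⟨?_, ?_⟩
        · intro j hj
          cases j with
          | zero => simpa [prefU] using (by omega : (0:Int) < d)
          | succ i =>
            rw [prefU_front]
            have := hall i (by omega)
            omega
        · rw [hstep, heq, prefU_front]
          have harg : tm + 1 + (n : Int) = tm + ((n+1 : Nat) : Int) := by push_cast; ring
          rw [harg]
          ring_nf

theorem down_cases (o : Int) (sc : List Int) : ∀ (k : Nat) (f : Nat) (d tm : Int),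
    (∃ j, j ≤ k ∧ 0 ≤ d + prefD o sc tm j) ∨
    ((∀ j, j ≤ k → d + prefD o sc tm j < 0) ∧
      downA o sc (k + f) d tm = downA o sc f (d + prefD o sc tm k) (tm - (k : Int))) := by
  intro k
  induction k with
  | zero =>
    intro f d tm
    by_cases hd : 0 ≤ d
    · exact Or.inl ⟨0, le_refl 0, by simpa [prefD] using hd⟩
    · refine Or.inr ⟨?_, by simp [prefD]⟩
      intro j hj
      interval_cases j
      simp [prefD]; omega
  | succ n ih =>
    intro f d tm
    by_cases hd : 0 ≤ d
    · exact Or.inl ⟨0, by omega, by simpa [prefD] using hd⟩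
    · have hstep : downA o sc (n + 1 + f) d tm
          = downA o sc (n + f) (d + scA o sc (tm - 1)) (tm - 1) := by
        rw [show n + 1 + f = (n + f) + 1 from by omega]
        simp only [downA, if_pos (by omega : d < 0)]
      rcases ih f (d + scA o sc (tm - 1)) (tm - 1) with ⟨j, hj, hle⟩ | ⟨hall, heq⟩
      · refine Or.inl ⟨j + 1, by omega, ?_⟩
        rw [prefD_front]
        omega
      · refine Or.inr ⟨?_, ?_⟩
        · intro j hj
          cases j with
          | zero => simpa [prefD] using (by omega : d < 0)
          | succ i =>
            rw [prefD_front]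
            have := hall i (by omega)
            omega
        · rw [hstep, heq, prefD_front]
          have harg : tm - 1 - (n : Int) = tm - ((n+1 : Nat) : Int) := by push_cast; ring
          rw [harg]
          ring_nf

theorem prefU_period (o : Int) (sc : List Int) : ∀ (k : Nat) (tm : Int),
    prefU o sc (tm + 12) k = prefU o sc tm k := by
  intro k
  induction k with
  | zero => intro tm; rfl
  | succ n ih =>
    intro tm
    have h1 : prefU o sc (tm+12) (n+1) = prefU o sc (tm+12) n + scA o sc (tm + 12 + (n+1 : Nat)) := rfl
    have h2 : prefU o sc tm (n+1) = prefU o sc tm n + scA o sc (tm + (n+1 : Nat)) := rfl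
    rw [h1, h2, ih tm,
      show tm + 12 + ((n+1 : Nat) : Int) = (tm + ((n+1 : Nat) : Int)) + 12 by ring,
      scA_period]

theorem prefD_period (o : Int) (sc : List Int) : ∀ (k : Nat) (tm : Int),
    prefD o sc (tm - 12) k = prefD o sc tm k := by
  intro k
  induction k with
  | zero => intro tm; rfl
  | succ n ih =>
    intro tm
    have h1 : prefD o sc (tm-12) (n+1) = prefD o sc (tm-12) n + scA o sc (tm - 12 - (n+1 : Nat)) := rfl
    have h2 : prefD o sc tm (n+1) = prefD o sc tm n + scA o sc (tm - (n+1 : Nat)) := rfl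
    rw [h1, h2, ih tm,
      show tm - 12 - ((n+1 : Nat) : Int) = (tm - ((n+1 : Nat) : Int)) - 12 by ring,
      scA_period']

theorem sum12U (o : Int) (sc : List Int) (h12 : sc.length = 12) (t : Int) :
    prefU o sc t 12 = sc.sum := by
  rcases sc with _ | ⟨a0, _ | ⟨a1, _ | ⟨a2, _ | ⟨a3, _ | ⟨a4, _ | ⟨a5, _ | ⟨a6, _ | ⟨a7, _ | ⟨a8, _ | ⟨a9, _ | ⟨a10, _ | ⟨a11, rest⟩⟩⟩⟩⟩⟩⟩⟩⟩⟩⟩⟩ <;> simp at h12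
  obtain rfl : rest = [] := by
    cases rest with
    | nil => rfl
    | cons x xs => simp at h12
  set L : List Int := [a0,a1,a2,a3,a4,a5,a6,a7,a8,a9,a10,a11] with hL
  have hmod : ∀ x : Int, PySem.Int.mod x 12 = x % 12 :=
    fun x => PySem.Int.mod_eq_emod_of_pos (by norm_num)
  have hsc : ∀ x : Int, scA o L x = L.getD ((o + x) % 12).toNat 0 := by
    intro x
    unfold scA
    rw [hmod]
    rw [PySem.List.pyGet?_of_nonneg L (by omega : (0:Int) ≤ (o + x) % 12)]
    simp [List.getD]
  simp only [prefU, hsc]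
  set c : Int := (o + (t + 1)) % 12 with hc
  have hc0 : 0 ≤ c := by omega
  have hc12 : c < 12 := by omega
  have e : ∀ i : Int, (o + (t + i)) % 12 = (c + (i - 1)) % 12 := by intro i; omega
  norm_num
  rw [e 1, e 2, e 3, e 4, e 5, e 6, e 7, e 8, e 9, e 10, e 11, e 12]
  interval_cases c <;>
    · simp [hL]
      ring

theorem sum12D (o : Int) (sc : List Int) (h12 : sc.length = 12) (t : Int) :
    prefD o sc t 12 = sc.sum := by
  rcases sc with _ | ⟨a0, _ | ⟨a1, _ | ⟨a2, _ | ⟨a3, _ | ⟨a4, _ | ⟨a5, _ | ⟨a6, _ | ⟨a7, _ | ⟨a8, _ | ⟨a9, _ | ⟨a10, _ | ⟨a11, rest⟩⟩⟩⟩⟩⟩⟩⟩⟩⟩⟩⟩ <;> simp at h12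
  obtain rfl : rest = [] := by
    cases rest with
    | nil => rfl
    | cons x xs => simp at h12
  set L : List Int := [a0,a1,a2,a3,a4,a5,a6,a7,a8,a9,a10,a11] with hL
  have hmod : ∀ x : Int, PySem.Int.mod x 12 = x % 12 :=
    fun x => PySem.Int.mod_eq_emod_of_pos (by norm_num)
  have hsc : ∀ x : Int, scA o L x = L.getD ((o + x) % 12).toNat 0 := by
    intro x
    unfold scA
    rw [hmod]
    rw [PySem.List.pyGet?_of_nonneg L (by omega : (0:Int) ≤ (o + x) % 12)]
    simp [List.getD]
  simp only [prefD, hsc]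
  set c : Int := (o + (t - 1)) % 12 with hc
  have hc0 : 0 ≤ c := by omega
  have hc12 : c < 12 := by omega
  have e : ∀ i : Int, (o + (t - i)) % 12 = (c - (i - 1)) % 12 := by intro i; omega
  norm_num
  rw [e 1, e 2, e 3, e 4, e 5, e 6, e 7, e 8, e 9, e 10, e 11, e 12]
  interval_cases c <;>
    · simp [hL]
      ring

theorem pyRangeEval : PySem.List.pyRange 2 13 1 = [2,3,4,5,6,7,8,9,10,11,12] := by
  simp [PySem.List.pyRange_one_cons]

theorem iteMax (a b : Int) : (if a < b then b else a) = max a b := by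
  by_cases h : a < b <;> simp [h] <;> omega

set_option maxHeartbeats 1000000 in
theorem upM_eq (o : Int) (sc : List Int) (tm : Int) :
    upM o sc tm = max (max (max (max (max (max (max (max (max (max (max
      (prefU o sc tm 1) (prefU o sc tm 2)) (prefU o sc tm 3)) (prefU o sc tm 4))
      (prefU o sc tm 5)) (prefU o sc tm 6)) (prefU o sc tm 7)) (prefU o sc tm 8))
      (prefU o sc tm 9)) (prefU o sc tm 10)) (prefU o sc tm 11)) (prefU o sc tm 12) := by
  unfold upM
  rw [pyRangeEval]
  simp only [List.foldl_cons, List.foldl_nil, scB_eq_scA, iteMax, prefU, zero_add]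
  push_cast
  rfl

set_option maxHeartbeats 1000000 in
theorem downM_eq (o : Int) (sc : List Int) (tm : Int) :
    downM o sc tm = max (max (max (max (max (max (max (max (max (max (max
      (prefD o sc tm 1) (prefD o sc tm 2)) (prefD o sc tm 3)) (prefD o sc tm 4))
      (prefD o sc tm 5)) (prefD o sc tm 6)) (prefD o sc tm 7)) (prefD o sc tm 8))
      (prefD o sc tm 9)) (prefD o sc tm 10)) (prefD o sc tm 11)) (prefD o sc tm 12) := by
  unfold downM
  rw [pyRangeEval]
  simp only [List.foldl_cons, List.foldl_nil, scB_eq_scA, iteMax, prefD, zero_add]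
  push_cast
  rfl

theorem maxmono {x y z : Int} (h : x ≤ y) : x ≤ max y z := le_trans h (le_max_left _ _)

theorem maxle {d a b : Int} {P : Prop} (h : d ≤ max a b) (h1 : d ≤ a → P) (h2 : d ≤ b → P) : P :=
  (le_max_iff.mp h).elim h1 h2

theorem upM_ge (o : Int) (sc : List Int) (tm : Int) :
    ∀ k : Nat, 1 ≤ k → k ≤ 12 → prefU o sc tm k ≤ upM o sc tm := by
  intro k h1 h2
  rw [upM_eq]
  interval_cases k
  exacts [maxmono (maxmono (maxmono (maxmono (maxmono (maxmono (maxmono (maxmono (maxmono (maxmono (le_max_left _ _)))))))))),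
    maxmono (maxmono (maxmono (maxmono (maxmono (maxmono (maxmono (maxmono (maxmono (maxmono (le_max_right _ _)))))))))),
    maxmono (maxmono (maxmono (maxmono (maxmono (maxmono (maxmono (maxmono (maxmono (le_max_right _ _))))))))),
    maxmono (maxmono (maxmono (maxmono (maxmono (maxmono (maxmono (maxmono (le_max_right _ _)))))))),
    maxmono (maxmono (maxmono (maxmono (maxmono (maxmono (maxmono (le_max_right _ _))))))),
    maxmono (maxmono (maxmono (maxmono (maxmono (maxmono (le_max_right _ _)))))),
    maxmono (maxmono (maxmono (maxmono (maxmono (le_max_right _ _))))),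
    maxmono (maxmono (maxmono (maxmono (le_max_right _ _)))),
    maxmono (maxmono (maxmono (le_max_right _ _))),
    maxmono (maxmono (le_max_right _ _)),
    maxmono (le_max_right _ _),
    le_max_right _ _]

theorem upM_ex (o : Int) (sc : List Int) (tm d : Int) (h : d ≤ upM o sc tm) :
    ∃ k : Nat, 1 ≤ k ∧ k ≤ 12 ∧ d ≤ prefU o sc tm k := by
  rw [upM_eq] at h
  refine maxle h (fun h => ?_) (fun h => ⟨12, by omega, by omega, h⟩)
  refine maxle h (fun h => ?_) (fun h => ⟨11, by omega, by omega, h⟩)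
  refine maxle h (fun h => ?_) (fun h => ⟨10, by omega, by omega, h⟩)
  refine maxle h (fun h => ?_) (fun h => ⟨9, by omega, by omega, h⟩)
  refine maxle h (fun h => ?_) (fun h => ⟨8, by omega, by omega, h⟩)
  refine maxle h (fun h => ?_) (fun h => ⟨7, by omega, by omega, h⟩)
  refine maxle h (fun h => ?_) (fun h => ⟨6, by omega, by omega, h⟩)
  refine maxle h (fun h => ?_) (fun h => ⟨5, by omega, by omega, h⟩)
  refine maxle h (fun h => ?_) (fun h => ⟨4, by omega, by omega, h⟩)
  refine maxle h (fun h => ?_) (fun h => ⟨3, by omega, by omega, h⟩)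
  refine maxle h (fun h => ⟨1, by omega, by omega, h⟩) (fun h => ⟨2, by omega, by omega, h⟩)

theorem upM_period (o : Int) (sc : List Int) (tm : Int) :
    upM o sc (tm + 12) = upM o sc tm := by
  rw [upM_eq, upM_eq]
  simp [prefU_period]

theorem downM_ge (o : Int) (sc : List Int) (tm : Int) :
    ∀ k : Nat, 1 ≤ k → k ≤ 12 → prefD o sc tm k ≤ downM o sc tm := by
  intro k h1 h2
  rw [downM_eq]
  interval_cases k
  exacts [maxmono (maxmono (maxmono (maxmono (maxmono (maxmono (maxmono (maxmono (maxmono (maxmono (le_max_left _ _)))))))))),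
    maxmono (maxmono (maxmono (maxmono (maxmono (maxmono (maxmono (maxmono (maxmono (maxmono (le_max_right _ _)))))))))),
    maxmono (maxmono (maxmono (maxmono (maxmono (maxmono (maxmono (maxmono (maxmono (le_max_right _ _))))))))),
    maxmono (maxmono (maxmono (maxmono (maxmono (maxmono (maxmono (maxmono (le_max_right _ _)))))))),
    maxmono (maxmono (maxmono (maxmono (maxmono (maxmono (maxmono (le_max_right _ _))))))),
    maxmono (maxmono (maxmono (maxmono (maxmono (maxmono (le_max_right _ _)))))),
    maxmono (maxmono (maxmono (maxmono (maxmono (le_max_right _ _))))),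
    maxmono (maxmono (maxmono (maxmono (le_max_right _ _)))),
    maxmono (maxmono (maxmono (le_max_right _ _))),
    maxmono (maxmono (le_max_right _ _)),
    maxmono (le_max_right _ _),
    le_max_right _ _]

theorem downM_ex (o : Int) (sc : List Int) (tm d : Int) (h : 0 ≤ d + downM o sc tm) :
    ∃ k : Nat, 1 ≤ k ∧ k ≤ 12 ∧ 0 ≤ d + prefD o sc tm k := by
  have h' : -d ≤ downM o sc tm := by omega
  rw [downM_eq] at h'
  refine maxle h' (fun h => ?_) (fun h => ⟨12, by omega, by omega, by omega⟩)
  refine maxle h (fun h => ?_) (fun h => ⟨11, by omega, by omega, by omega⟩)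
  refine maxle h (fun h => ?_) (fun h => ⟨10, by omega, by omega, by omega⟩)
  refine maxle h (fun h => ?_) (fun h => ⟨9, by omega, by omega, by omega⟩)
  refine maxle h (fun h => ?_) (fun h => ⟨8, by omega, by omega, by omega⟩)
  refine maxle h (fun h => ?_) (fun h => ⟨7, by omega, by omega, by omega⟩)
  refine maxle h (fun h => ?_) (fun h => ⟨6, by omega, by omega, by omega⟩)
  refine maxle h (fun h => ?_) (fun h => ⟨5, by omega, by omega, by omega⟩)
  refine maxle h (fun h => ?_) (fun h => ⟨4, by omega, by omega, by omega⟩)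
  refine maxle h (fun h => ?_) (fun h => ⟨3, by omega, by omega, by omega⟩)
  refine maxle h (fun h => ⟨1, by omega, by omega, by omega⟩) (fun h => ⟨2, by omega, by omega, by omega⟩)

theorem downM_period (o : Int) (sc : List Int) (tm : Int) :
    downM o sc (tm - 12) = downM o sc tm := by
  rw [downM_eq, downM_eq]
  simp [prefD_period]

theorem up_skip (o : Int) (sc : List Int) (h12 : sc.length = 12) (f : Nat) (d tm : Int)
    (hd : 0 < d) (h : ∀ j : Nat, 1 ≤ j → j ≤ 12 → prefU o sc tm j < d) :
    upA o sc (12 + f) d tm = upA o sc f (d - sc.sum) (tm + 12) := by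
  rcases up_cases o sc 12 f d tm with ⟨j, hj, hle⟩ | ⟨hall, heq⟩
  · cases j with
    | zero => simp [prefU] at hle; omega
    | succ i => have := h (i+1) (by omega) (by omega); omega
  · rw [heq, sum12U o sc h12 tm]
    norm_num

theorem down_skip (o : Int) (sc : List Int) (h12 : sc.length = 12) (f : Nat) (d tm : Int)
    (hd : d < 0) (h : ∀ j : Nat, 1 ≤ j → j ≤ 12 → d + prefD o sc tm j < 0) :
    downA o sc (12 + f) d tm = downA o sc f (d + sc.sum) (tm - 12) := by
  rcases down_cases o sc 12 f d tm with ⟨j, hj, hle⟩ | ⟨hall, heq⟩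
  · cases j with
    | zero => simp [prefD] at hle; omega
    | succ i => have := h (i+1) (by omega) (by omega); omega
  · rw [heq, sum12D o sc h12 tm]
    norm_num

theorem up_jump (o : Int) (sc : List Int) (h12 : sc.length = 12) (hs : 0 < sc.sum) :
    ∀ (q f : Nat) (d tm : Int), (∀ i : Nat, i < q → upM o sc tm < d - (i : Int) * sc.sum) →
    upA o sc (12 * q + f) d tm = upA o sc f (d - (q : Int) * sc.sum) (tm + 12 * (q : Int)) := by
  intro q
  induction q with
  | zero => intro f d tm _; norm_num
  | succ n ih =>
    intro f d tm hq
    have hsM : sc.sum ≤ upM o sc tm := by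
      have := upM_ge o sc tm 12 (by omega) (by omega)
      rwa [sum12U o sc h12 tm] at this
    have h0 : upM o sc tm < d := by
      have := hq 0 (by omega); norm_num at this; exact this
    have hd : 0 < d := by omega
    rw [show 12 * (n + 1) + f = 12 + (12 * n + f) from by omega]
    rw [up_skip o sc h12 _ d tm hd
      (fun j hj1 hj2 => lt_of_le_of_lt (upM_ge o sc tm j hj1 hj2) h0)]
    have hq' : ∀ i : Nat, i < n → upM o sc (tm + 12) < (d - sc.sum) - (i : Int) * sc.sum := by
      intro i hi
      have h1 := hq (i + 1) (by omega)
      push_cast at h1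
      rw [upM_period]
      have e : ((i : Int) + 1) * sc.sum = (i : Int) * sc.sum + sc.sum := by ring
      linarith
    rw [ih f (d - sc.sum) (tm + 12) hq']
    congr 1 <;> push_cast <;> ring

theorem down_jump (o : Int) (sc : List Int) (h12 : sc.length = 12) (hs : 0 < sc.sum) :
    ∀ (q f : Nat) (d tm : Int), (∀ i : Nat, i < q → d + (i : Int) * sc.sum + downM o sc tm < 0) →
    downA o sc (12 * q + f) d tm = downA o sc f (d + (q : Int) * sc.sum) (tm - 12 * (q : Int)) := by
  intro q
  induction q with
  | zero => intro f d tm _; norm_num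
  | succ n ih =>
    intro f d tm hq
    have hsM : sc.sum ≤ downM o sc tm := by
      have := downM_ge o sc tm 12 (by omega) (by omega)
      rwa [sum12D o sc h12 tm] at this
    have h0 : d + downM o sc tm < 0 := by
      have := hq 0 (by omega); norm_num at this; exact this
    have hd : d < 0 := by omega
    rw [show 12 * (n + 1) + f = 12 + (12 * n + f) from by omega]
    rw [down_skip o sc h12 _ d tm hd
      (fun j hj1 hj2 => by have := downM_ge o sc tm j hj1 hj2; omega)]
    have hq' : ∀ i : Nat, i < n → (d + sc.sum) + (i : Int) * sc.sum + downM o sc (tm - 12) < 0 := by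
      intro i hi
      have h1 := hq (i + 1) (by omega)
      push_cast at h1
      rw [downM_period]
      have e : ((i : Int) + 1) * sc.sum = (i : Int) * sc.sum + sc.sum := by ring
      linarith
    rw [ih f (d + sc.sum) (tm - 12) hq']
    congr 1 <;> push_cast <;> ring

theorem upM_period_mul (o : Int) (sc : List Int) : ∀ (n : Nat) (tm : Int),
    upM o sc (tm + 12 * (n : Int)) = upM o sc tm := by
  intro n
  induction n with
  | zero => intro tm; norm_num
  | succ m ih =>
    intro tm
    rw [show tm + 12 * ((m+1 : Nat) : Int) = (tm + 12 * (m : Int)) + 12 by push_cast; ring,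
      upM_period, ih]

theorem downM_period_mul (o : Int) (sc : List Int) : ∀ (n : Nat) (tm : Int),
    downM o sc (tm - 12 * (n : Int)) = downM o sc tm := by
  intro n
  induction n with
  | zero => intro tm; norm_num
  | succ m ih =>
    intro tm
    rw [show tm - 12 * ((m+1 : Nat) : Int) = (tm - 12 * (m : Int)) - 12 by push_cast; ring,
      downM_period, ih]

theorem up_complete_of_le (o : Int) (sc : List Int) (f : Nat) (d tm : Int)
    (hf : 12 ≤ f) (hdm : d ≤ upM o sc tm) : (upA o sc f d tm).1 ≤ 0 := by
  obtain ⟨k, hk1, hk2, hk3⟩ := upM_ex o sc tm d hdm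
  obtain ⟨e, rfl⟩ : ∃ e, f = k + e := ⟨f - k, by omega⟩
  exact up_completes o sc k e d tm hk3

theorem down_complete_of_le (o : Int) (sc : List Int) (f : Nat) (d tm : Int)
    (hf : 12 ≤ f) (hdm : 0 ≤ d + downM o sc tm) : 0 ≤ (downA o sc f d tm).1 := by
  obtain ⟨k, hk1, hk2, hk3⟩ := downM_ex o sc tm d hdm
  obtain ⟨e, rfl⟩ : ∃ e, f = k + e := ⟨f - k, by omega⟩
  exact down_completes o sc k e d tm hk3

theorem up_phase (o : Int) (sc : List Int) (h12 : sc.length = 12) (hs : 0 < sc.sum) (d0 : Int) :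
    (if 0 < d0 then
      upB o sc 12
        (if upM o sc 0 < d0 then
          (d0 - -(PySem.Int.floordiv (upM o sc 0 - d0) sc.sum) * sc.sum,
           12 * -(PySem.Int.floordiv (upM o sc 0 - d0) sc.sum)) else (d0, 0)).1
        (if upM o sc 0 < d0 then
          (d0 - -(PySem.Int.floordiv (upM o sc 0 - d0) sc.sum) * sc.sum,
           12 * -(PySem.Int.floordiv (upM o sc 0 - d0) sc.sum)) else (d0, 0)).2
    else (d0, 0)) = upA o sc (12 * d0.toNat + 12) d0 0 := by
  set m := upM o sc 0 with hm
  have hsM : sc.sum ≤ m := by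
    have := upM_ge o sc 0 12 (by omega) (by omega)
    rwa [sum12U o sc h12 0] at this
  by_cases hd : 0 < d0
  · rw [if_pos hd]
    by_cases hmd : m < d0
    · rw [if_pos hmd]
      dsimp only
      set q := -(PySem.Int.floordiv (m - d0) sc.sum) with hqdef
      have hfd : PySem.Int.floordiv (m - d0) sc.sum = (m - d0) / sc.sum :=
        PySem.Int.floordiv_eq_ediv_of_pos hs
      have hEr := Int.ediv_add_emod (m - d0) sc.sum
      have hr0 : 0 ≤ (m - d0) % sc.sum := Int.emod_nonneg _ (by omega)
      have hrs : (m - d0) % sc.sum < sc.sum := Int.emod_lt_of_pos _ hs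
      have hqs : q * sc.sum = d0 - m + (m - d0) % sc.sum := by
        rw [hqdef, hfd]; linear_combination -hEr
      have hb2 : d0 - m ≤ q * sc.sum := by omega
      have hqm1 : (q - 1) * sc.sum = q * sc.sum - sc.sum := by ring
      have hb1 : (q - 1) * sc.sum < d0 - m := by omega
      have hq1 : 1 ≤ q := by
        by_contra hc
        push_neg at hc
        have h0 : q * sc.sum ≤ 0 := by
          calc q * sc.sum ≤ 0 * sc.sum := mul_le_mul_of_nonneg_right (by omega) (by omega)
          _ = 0 := by ring
        omega
      have hqd0 : q < d0 := by
        have h1 : q ≤ q * sc.sum := le_mul_of_one_le_right (by omega) (by omega)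
        omega
      set qn := q.toNat with hqn
      have hqq : (qn : Int) = q := by omega
      have hjump := up_jump o sc h12 hs qn (12 * (d0.toNat - qn) + 12) d0 0 (by
        intro i hi
        have his : (i : Int) * sc.sum ≤ (q - 1) * sc.sum :=
          mul_le_mul_of_nonneg_right (by omega) (by omega)
        omega)
      have hfuel : 12 * d0.toNat + 12 = 12 * qn + (12 * (d0.toNat - qn) + 12) := by omega
      rw [hfuel, hjump, upB_eq_upA, hqq, show (0:Int) + 12 * q = 12 * q by ring]
      have hMM : upM o sc (12 * q) = m := by
        rw [← hqq, show (12 : Int) * (qn : Int) = 0 + 12 * (qn : Int) by ring, upM_period_mul]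
      exact up_unique o sc 12 _ (d0 - q * sc.sum) (12 * q)
        (up_complete_of_le o sc 12 _ _ (by omega) (by rw [hMM]; omega))
        (up_complete_of_le o sc _ _ _ (by omega) (by rw [hMM]; omega))
    · rw [if_neg hmd]
      dsimp only
      rw [upB_eq_upA]
      exact up_unique o sc 12 _ d0 0
        (up_complete_of_le o sc 12 _ _ (by omega) (by omega))
        (up_complete_of_le o sc _ _ _ (by omega) (by omega))
  · rw [if_neg hd, up_exit o sc _ d0 0 (by omega)]

theorem down_phase (o : Int) (sc : List Int) (h12 : sc.length = 12) (hs : 0 < sc.sum)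
    (d1 t1 : Int) :
    (if d1 < 0 then
      (downB o sc 12
        (if d1 + downM o sc t1 < 0 then
          (d1 + -(PySem.Int.floordiv (d1 + downM o sc t1) sc.sum) * sc.sum,
           t1 - 12 * -(PySem.Int.floordiv (d1 + downM o sc t1) sc.sum)) else (d1, t1)).1
        (if d1 + downM o sc t1 < 0 then
          (d1 + -(PySem.Int.floordiv (d1 + downM o sc t1) sc.sum) * sc.sum,
           t1 - 12 * -(PySem.Int.floordiv (d1 + downM o sc t1) sc.sum)) else (d1, t1)).2).2
    else t1) = (downA o sc (12 * d1.natAbs + 12) d1 t1).2 := by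
  set m := downM o sc t1 with hm
  have hsM : sc.sum ≤ m := by
    have := downM_ge o sc t1 12 (by omega) (by omega)
    rwa [sum12D o sc h12 t1] at this
  by_cases hd : d1 < 0
  · rw [if_pos hd]
    by_cases hmd : d1 + m < 0
    · rw [if_pos hmd]
      dsimp only
      set q := -(PySem.Int.floordiv (d1 + m) sc.sum) with hqdef
      have hfd : PySem.Int.floordiv (d1 + m) sc.sum = (d1 + m) / sc.sum :=
        PySem.Int.floordiv_eq_ediv_of_pos hs
      have hEr := Int.ediv_add_emod (d1 + m) sc.sum
      have hr0 : 0 ≤ (d1 + m) % sc.sum := Int.emod_nonneg _ (by omega)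
      have hrs : (d1 + m) % sc.sum < sc.sum := Int.emod_lt_of_pos _ hs
      have hqs : q * sc.sum = -(d1 + m) + (d1 + m) % sc.sum := by
        rw [hqdef, hfd]; linear_combination -hEr
      have hb2 : -(d1 + m) ≤ q * sc.sum := by omega
      have hqm1 : (q - 1) * sc.sum = q * sc.sum - sc.sum := by ring
      have hb1 : (q - 1) * sc.sum < -(d1 + m) := by omega
      have hq1 : 1 ≤ q := by
        by_contra hc
        push_neg at hc
        have h0 : q * sc.sum ≤ 0 := by
          calc q * sc.sum ≤ 0 * sc.sum := mul_le_mul_of_nonneg_right (by omega) (by omega)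
          _ = 0 := by ring
        omega
      have hqd0 : q < -d1 := by
        have h1 : q ≤ q * sc.sum := le_mul_of_one_le_right (by omega) (by omega)
        omega
      set qn := q.toNat with hqn
      have hqq : (qn : Int) = q := by omega
      have hjump := down_jump o sc h12 hs qn (12 * (d1.natAbs - qn) + 12) d1 t1 (by
        intro i hi
        have his : (i : Int) * sc.sum ≤ (q - 1) * sc.sum :=
          mul_le_mul_of_nonneg_right (by omega) (by omega)
        omega)
      have hfuel : 12 * d1.natAbs + 12 = 12 * qn + (12 * (d1.natAbs - qn) + 12) := by omega
      rw [hfuel, hjump, downB_eq_downA, hqq]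
      have hMM : downM o sc (t1 - 12 * q) = m := by
        rw [← hqq, downM_period_mul]
      have hpair : downA o sc 12 (d1 + q * sc.sum) (t1 - 12 * q)
          = downA o sc (12 * (d1.natAbs - qn) + 12) (d1 + q * sc.sum) (t1 - 12 * q) :=
        down_unique o sc 12 _ (d1 + q * sc.sum) (t1 - 12 * q)
          (down_complete_of_le o sc 12 _ _ (by omega) (by rw [hMM]; omega))
          (down_complete_of_le o sc _ _ _ (by omega) (by rw [hMM]; omega))
      rw [hpair]
    · rw [if_neg hmd]
      dsimp only
      rw [downB_eq_downA]
      have hpair : downA o sc 12 d1 t1 = downA o sc (12 * d1.natAbs + 12) d1 t1 :=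
        down_unique o sc 12 _ d1 t1
          (down_complete_of_le o sc 12 _ _ (by omega) (by omega))
          (down_complete_of_le o sc _ _ _ (by omega) (by omega))
      rw [hpair]
  · rw [if_neg hd, down_exit o sc _ d1 t1 (by omega)]

theorem main_eq (o d0 : Int) (sc : List Int) : modulate_key o d0 sc = modulate_key_alt o d0 sc := by
  by_cases hg : sc.length = 12 ∧ 0 < sc.sum
  · obtain ⟨h12, hs⟩ := hg
    unfold modulate_key modulate_key_alt
    rw [if_pos ⟨h12, hs⟩,
      if_neg (show ¬(sc.length ≠ 12 ∨ sc.sum ≤ 0) from by push_neg; exact ⟨h12, by omega⟩)]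
    dsimp only
    rw [up_phase o sc h12 hs d0]
    rw [down_phase o sc h12 hs (upA o sc (12 * d0.toNat + 12) d0 0).1
      (upA o sc (12 * d0.toNat + 12) d0 0).2]
  · unfold modulate_key modulate_key_alt
    rw [if_neg hg, if_pos (show sc.length ≠ 12 ∨ sc.sum ≤ 0 from by
      by_contra hc; push_neg at hc; exact hg ⟨hc.1, by omega⟩)]

-- ===== VERDICT (by name: the statement is the Claim_ definition above) =====
theorem modulate_key_spec : Claim_equal_modulate_key := by
  unfold Claim_equal_modulate_key Spec_modulate_key
  intro tonic_offset degrees_0 scale _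
  exact main_eq tonic_offset degrees_0 scale
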